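-- pv_equiv track=rewrite | github.com/RRZE-HPC/stempel | stempel/utilities.py | remove_for
-- ===== SOURCE A (Python) =====
-- def remove_for(loop_code):
--     mycode = loop_code.split('\n')
--     index = []
--     for i in range(len(mycode)):
--         if mycode[i].startswith('for'):
--             index.append(i)
--     line = index[-1]
--
--     mycode = mycode[line+1:]
--     mycode = '\n'.join(mycode)
--
--     return mycode
-- ===== SOURCE B (Python) =====
-- def remove_for(loop_code):
--     lines = loop_code.split('\n')
--     last = next(i for i in range(len(lines) - 1, -1, -1)
--                 if lines[i].startswith('for'))
--     return '\n'.join(lines[last + 1:])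
-- ===== Notes on version B (the rewrite author's own statement) =====
-- stated objective: simpler
-- what changed: B scans the lines backwards and stops at the first 'for' line instead of collecting every matching index into a list and taking its last element; no index list is maintained and the scan exits early.
import Mathlib
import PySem

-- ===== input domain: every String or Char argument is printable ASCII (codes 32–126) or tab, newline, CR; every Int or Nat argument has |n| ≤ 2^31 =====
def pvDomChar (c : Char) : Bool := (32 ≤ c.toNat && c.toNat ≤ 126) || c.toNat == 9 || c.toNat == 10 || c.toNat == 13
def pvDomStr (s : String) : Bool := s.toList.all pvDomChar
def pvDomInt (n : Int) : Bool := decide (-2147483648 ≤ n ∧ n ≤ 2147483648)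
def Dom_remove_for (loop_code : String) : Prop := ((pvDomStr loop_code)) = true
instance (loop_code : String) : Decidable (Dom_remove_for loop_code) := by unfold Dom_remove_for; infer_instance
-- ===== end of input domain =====

-- B replaces A's forward scan that collects every 'for'-line index with a backward scan that
-- stops at the first (= last) 'for' line;
-- where A raises IndexError (no 'for' line) B's generator is exhausted and raises StopIteration — outside Pre_.

-- ===== PORT A =====
def remove_for (loop_code : String) : String :=
  let mycode := (PySem.Str.split? loop_code "\n").getD []
  let index : List Int := (PySem.List.pyRange 0 mycode.length 1).foldl
    (fun acc i => if PySem.Str.startswith (PySem.List.pyGetD mycode i "") "for" then acc ++ [i] else acc) []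
  match PySem.List.pyGet? index (-1) with
  | none => ""   -- index[-1] raises IndexError in Python; excluded by Pre_remove_for
  | some line => PySem.Str.join "\n" (PySem.List.slice mycode (some (line + 1)) none)

-- ===== PORT B =====
-- backward generator of Source B: go (k+1) inspects lines[k] and returns early on a match;
-- go 0 is the exhausted generator (Python raises StopIteration there; excluded by Pre_remove_for)
def remove_for_alt_go (lines : List String) : Nat → String
  | 0 => ""
  | k + 1 =>
    if PySem.Str.startswith (PySem.List.pyGetD lines (k : Int) "") "for" then
      PySem.Str.join "\n" (PySem.List.slice lines (some ((k : Int) + 1)) none)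
    else
      remove_for_alt_go lines k

def remove_for_alt (loop_code : String) : String :=
  let lines := (PySem.Str.split? loop_code "\n").getD []
  remove_for_alt_go lines lines.length

-- ===== PRECONDITION & SPEC =====
-- Pre_ excludes exactly the inputs on which A raises IndexError: no split line starts with 'for'.
def Pre_remove_for (loop_code : String) : Prop :=
  ((PySem.Str.split? loop_code "\n").getD []).any (fun l => PySem.Str.startswith l "for") = true
instance (loop_code : String) : Decidable (Pre_remove_for loop_code) := by
  unfold Pre_remove_for; infer_instance

def pvWitness_remove_for : String := "for i in x:\n  y += 1"

def Spec_remove_for (loop_code : String) (out : String) : Prop := out = remove_for_alt loop_code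
instance (loop_code : String) (out : String) : Decidable (Spec_remove_for loop_code out) := by unfold Spec_remove_for; infer_instance

-- ===== CLAIM (what is proved, stated in full; the proofs are below) =====
def Claim_equal_remove_for : Prop := ∀ (loop_code : String), Dom_remove_for loop_code → Pre_remove_for loop_code → Spec_remove_for loop_code (remove_for loop_code)


-- ===== LEMMAS AND PROOFS =====

-- the predicate A tests at index i, and the index list A's loop builds for the first n lines
def pvP (L : List String) (i : Nat) : Bool := PySem.Str.startswith (L.getD i "") "for"

def pvIdx (L : List String) (n : Nat) : List Int :=
  (List.range n).foldl (fun acc i => if pvP L i then acc ++ [(i : Int)] else acc) []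

theorem pvIdx_succ (L : List String) (n : Nat) :
    pvIdx L (n + 1) = if pvP L n then pvIdx L n ++ [(n : Int)] else pvIdx L n := by
  simp [pvIdx, List.range_succ]

theorem pvMem_idx (L : List String) (n i : Nat) (hi : i < n) (hp : pvP L i = true) :
    (i : Int) ∈ pvIdx L n := by
  induction n with
  | zero => omega
  | succ m ih =>
    rw [pvIdx_succ]
    rcases Nat.lt_succ_iff_lt_or_eq.mp hi with h | h
    · split <;> simp [ih h]
    · subst h; simp [hp]

-- joint characterisation of A's index list and B's backward scan
theorem pvKey (L : List String) (n : Nat) :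
    (pvIdx L n = [] ∧ remove_for_alt_go L n = "") ∨
    (∃ j : Nat, (pvIdx L n).getLast? = some (j : Int) ∧
      remove_for_alt_go L n = PySem.Str.join "\n" (PySem.List.slice L (some ((j : Int) + 1)) none)) := by
  induction n with
  | zero => exact Or.inl ⟨rfl, rfl⟩
  | succ k ih =>
    rw [pvIdx_succ]
    have hgo : remove_for_alt_go L (k + 1) =
        if pvP L k then PySem.Str.join "\n" (PySem.List.slice L (some ((k : Int) + 1)) none)
        else remove_for_alt_go L k := by
      simp [remove_for_alt_go, pvP]
    by_cases h : pvP L k = true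
    · exact Or.inr ⟨k, by simp [h], by rw [hgo, if_pos h]⟩
    · have hf : pvP L k = false := Bool.eq_false_iff.mpr h
      rw [hgo, if_neg h]
      simp only [hf, Bool.false_eq_true, if_false]
      exact ih

theorem pvA_index_eq (L : List String) :
    (PySem.List.pyRange 0 L.length 1).foldl
      (fun acc i => if PySem.Str.startswith (PySem.List.pyGetD L i "") "for" then acc ++ [i] else acc) []
    = pvIdx L L.length := by
  rw [PySem.List.pyRange_zero_nat, List.foldl_map]
  simp [pvIdx, pvP]

-- ===== VERDICT (by name: the statement is the Claim_ definition above) =====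
theorem remove_for_spec : Claim_equal_remove_for := by
  intro lc _ hpre
  unfold Pre_remove_for at hpre
  unfold Spec_remove_for remove_for remove_for_alt
  simp only [pvA_index_eq, PySem.List.pyGet?_neg_one]
  generalize (PySem.Str.split? lc "\n").getD [] = L at hpre ⊢
  rcases pvKey L L.length with ⟨hnil, _⟩ | ⟨j, hlast, hgo⟩
  · -- Pre_ gives a line starting with 'for', contradicting an empty index list
    exfalso
    rcases List.any_eq_true.mp hpre with ⟨l, hl, hp⟩
    rcases List.mem_iff_getElem.mp hl with ⟨i, hi, hil⟩
    have hmem : (i : Int) ∈ pvIdx L L.length := by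
      apply pvMem_idx L L.length i hi
      simp [pvP, List.getD_eq_getElem?_getD, List.getElem?_eq_getElem hi, hil]
      simpa using hp
    rw [hnil] at hmem
    simp at hmem
  · rw [hlast]
    exact hgo.symm ▸ rfl
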